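-- pv_equiv track=rewrite | github.com/avkean/pyguard | lib/v5/v13/build_v13_3_stub.py | _strip_vm_source
-- ===== SOURCE A (Python) =====
-- def _strip_vm_source(source: str) -> str:
--     """Remove the docstring, `from __future__` and the `import
--     hashlib` (the bootstrap already imports it at the top)."""
--     lines = source.splitlines()
--     out = []
--     in_docstring = False
--     for ln in lines:
--         if ln.startswith('"""') and not in_docstring:
--             in_docstring = True
--             if ln.count('"""') >= 2:
--                 in_docstring = False
--             continue
--         if in_docstring:
--             if ln.endswith('"""'):
--                 in_docstring = False
--             continue
--         if ln.startswith("from __future__"):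
--             continue
--         if ln.startswith("import hashlib"):
--             continue
--         out.append(ln)
--     return "\n".join(out)
-- ===== SOURCE B (Python) =====
-- def _strip_vm_source(source: str) -> str:
--     lines = source.splitlines()
--     out = []
--     i, n = 0, len(lines)
--     while i < n:
--         ln = lines[i]
--         if ln.startswith('"""'):
--             if ln.count('"""') >= 2:
--                 i += 1
--                 continue
--             i += 1
--             while i < n and not lines[i].endswith('"""'):
--                 i += 1
--             i += 1
--             continue
--         if ln.startswith("from __future__") or ln.startswith("import hashlib"):
--             i += 1
--             continue
--         out.append(ln)
--         i += 1
--     return "\n".join(out)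
-- ===== Notes on version B (the rewrite author's own statement) =====
-- stated objective: alternative
-- what changed: Replaced the flag-carrying single-pass state machine (in_docstring boolean threaded through every line) by an index-based while loop with a dedicated inner skip loop that consumes a docstring body in one go; no boolean state survives across iterations.
import Mathlib
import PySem

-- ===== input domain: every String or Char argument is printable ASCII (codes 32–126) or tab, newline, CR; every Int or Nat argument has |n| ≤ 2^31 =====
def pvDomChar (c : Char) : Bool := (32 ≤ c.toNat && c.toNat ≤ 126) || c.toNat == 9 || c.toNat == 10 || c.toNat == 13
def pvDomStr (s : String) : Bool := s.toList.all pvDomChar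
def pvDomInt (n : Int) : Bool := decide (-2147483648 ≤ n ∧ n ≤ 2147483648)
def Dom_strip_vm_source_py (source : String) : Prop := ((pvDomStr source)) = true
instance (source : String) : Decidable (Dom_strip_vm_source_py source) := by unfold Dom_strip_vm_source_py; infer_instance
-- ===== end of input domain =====

-- ===== PORT A =====
-- B replaces A's in_docstring flag threaded through one fold by an index/skip-loop decomposition (ported as recursion with a separate skip helper); alternative structure, same cost.

-- loop body of A's for-loop, state = (out, in_docstring)
def stripStepA (acc : List String × Bool) (ln : String) : List String × Bool :=
  if PySem.Str.startswith ln "\"\"\"" && !acc.2 then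
    if 2 ≤ PySem.Str.count ln "\"\"\"" then (acc.1, false) else (acc.1, true)
  else if acc.2 then
    (if PySem.Str.endswith ln "\"\"\"" then (acc.1, false) else (acc.1, true))
  else if PySem.Str.startswith ln "from __future__" then acc
  else if PySem.Str.startswith ln "import hashlib" then acc
  else (acc.1 ++ [ln], acc.2)

def strip_vm_source_py (source : String) : String :=
  let lines := PySem.Str.splitlines source
  PySem.Str.join "\n" (lines.foldl stripStepA ([], false)).1

-- ===== PORT B =====
-- B's inner while: drop lines up to and including the first one that endswith '"""'
def stripSkipB (lines : List String) : List String :=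
  match lines with
  | [] => []
  | ln :: rest => if PySem.Str.endswith ln "\"\"\"" then rest else stripSkipB rest

lemma stripSkipB_length_le (lines : List String) : (stripSkipB lines).length ≤ lines.length := by
  induction lines with
  | nil => simp [stripSkipB]
  | cons ln rest ih =>
    simp only [stripSkipB]
    split
    · simp
    · exact Nat.le_succ_of_le ih


-- B's outer while over the remaining suffix of lines
def stripGoB (lines : List String) : List String :=
  match lines with
  | [] => []
  | ln :: rest =>
    if PySem.Str.startswith ln "\"\"\"" then
      if 2 ≤ PySem.Str.count ln "\"\"\"" then stripGoB rest
      else stripGoB (stripSkipB rest)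
    else if PySem.Str.startswith ln "from __future__" || PySem.Str.startswith ln "import hashlib" then
      stripGoB rest
    else ln :: stripGoB rest
termination_by lines.length
decreasing_by
  · simp
  · simp only [List.length_cons]
    exact Nat.lt_succ_of_le (stripSkipB_length_le rest)
  · simp
  · simp

def strip_vm_source_py_alt (source : String) : String :=
  PySem.Str.join "\n" (stripGoB (PySem.Str.splitlines source))

-- ===== PRECONDITION & SPEC =====
def Spec_strip_vm_source_py (source : String) (out : String) : Prop := out = strip_vm_source_py_alt source
instance (source : String) (out : String) : Decidable (Spec_strip_vm_source_py source out) := by unfold Spec_strip_vm_source_py; infer_instance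

-- ===== CLAIM (what is proved, stated in full; the proofs are below) =====
def Claim_equal_strip_vm_source_py : Prop := ∀ (source : String), Dom_strip_vm_source_py source → Spec_strip_vm_source_py source (strip_vm_source_py source)

-- ===== LEMMAS AND PROOFS =====

-- A's fold with flag b equals B's recursion: flag true means "inside a docstring", i.e. skip to the closer first.
lemma foldA_eq (lines : List String) : ∀ (out : List String) (b : Bool),
    (lines.foldl stripStepA (out, b)).1
      = out ++ (if b then stripGoB (stripSkipB lines) else stripGoB lines) := by
  induction lines with
  | nil => intro out b; cases b <;> simp [stripSkipB, stripGoB]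
  | cons ln rest ih =>
    intro out b
    have hFT : ¬((false : Bool) = true) := by simp
    have hTT : (true : Bool) = true := rfl
    cases b with
    | true =>
      have hstep : stripStepA (out, true) ln =
          (if PySem.Str.endswith ln "\"\"\"" then (out, false) else (out, true)) := by
        simp only [stripStepA, Bool.not_true, Bool.and_false, Bool.false_eq_true, if_false, if_true]
      rw [List.foldl_cons, hstep, if_pos hTT]
      simp only [stripSkipB]
      by_cases he : PySem.Str.endswith ln "\"\"\"" = true
      · rw [if_pos he, if_pos he, ih, if_neg hFT]
      · rw [if_neg he, if_neg he, ih, if_pos hTT]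
    | false =>
      have hstep : stripStepA (out, false) ln =
          (if PySem.Str.startswith ln "\"\"\"" then
            (if 2 ≤ PySem.Str.count ln "\"\"\"" then (out, false) else (out, true))
          else if PySem.Str.startswith ln "from __future__" then (out, false)
          else if PySem.Str.startswith ln "import hashlib" then (out, false)
          else (out ++ [ln], false)) := by
        simp only [stripStepA, Bool.not_false, Bool.and_true, Bool.false_eq_true, if_false]
      rw [List.foldl_cons, hstep, if_neg hFT, stripGoB]
      by_cases hs : PySem.Str.startswith ln "\"\"\"" = true
      · rw [if_pos hs, if_pos hs]
        by_cases hc : 2 ≤ PySem.Str.count ln "\"\"\""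
        · rw [if_pos hc, if_pos hc, ih, if_neg hFT]
        · rw [if_neg hc, if_neg hc, ih, if_pos hTT]
      · rw [if_neg hs, if_neg hs]
        by_cases hf : PySem.Str.startswith ln "from __future__" = true
        · rw [if_pos hf, if_pos (by rw [Bool.or_eq_true]; exact Or.inl hf), ih, if_neg hFT]
        · rw [if_neg hf]
          by_cases hh : PySem.Str.startswith ln "import hashlib" = true
          · rw [if_pos hh, if_pos (by rw [Bool.or_eq_true]; exact Or.inr hh), ih, if_neg hFT]
          · rw [if_neg hh, if_neg (by rw [Bool.or_eq_true]; rintro (h | h); exact hf h; exact hh h), ih, if_neg hFT]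
            simp

-- ===== VERDICT (by name: the statement is the Claim_ definition above) =====
theorem strip_vm_source_py_spec : Claim_equal_strip_vm_source_py := by
  intro source _
  unfold Spec_strip_vm_source_py strip_vm_source_py strip_vm_source_py_alt
  simp [foldA_eq]
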